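-- pv_equiv track=rewrite | github.com/quazfenton/inYacitY | scraper/ra_co.py | _looks_blocked
-- ===== SOURCE A (Python) =====
-- def _looks_blocked(html: str) -> bool:
--     if not html:
--         return True
--     text = html.lower()
--     indicators = [
--         'access denied',
--         'verify you are human',
--         'captcha',
--         'datadome',
--         'incident id',
--         'blocked',
--         'challenge',
--     ]
--     return any(indicator in text for indicator in indicators)
-- ===== SOURCE B (Python) =====
-- # Multi-pattern matching via a trie of the indicators, scanned in ONE pass with
-- # an NFA-style set of active trie states (no lowered copy, no per-pattern scans).
-- _INDICATORS = (
--     'access denied',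
--     'verify you are human',
--     'captcha',
--     'datadome',
--     'incident id',
--     'blocked',
--     'challenge',
-- )
--
--
-- def _build_trie(words):
--     children = [{}]
--     terminal = [False]
--     for w in words:
--         node = 0
--         for ch in w:
--             nxt = children[node].get(ch)
--             if nxt is None:
--                 nxt = len(children)
--                 children.append({})
--                 terminal.append(False)
--                 children[node][ch] = nxt
--             node = nxt
--         terminal[node] = True
--     return children, terminal
--
--
-- _CHILDREN, _TERMINAL = _build_trie(_INDICATORS)
--
--
-- def _looks_blocked(html: str) -> bool:
--     if not html:
--         return True
--     active = {0}
--     found = False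
--     for ch in html:
--         c = ch.lower()
--         nxt = {0}
--         for node in active:
--             t = _CHILDREN[node].get(c)
--             if t is not None:
--                 nxt.add(t)
--         active = nxt
--         found = found or any(_TERMINAL[n] for n in active)
--     return found
-- ===== Notes on version B (the rewrite author's own statement) =====
-- stated objective: alternative
-- what changed: B builds a trie of the seven indicators once and scans the text in a single pass, maintaining an NFA-style set of active trie states and a found flag, instead of seven independent substring scans over a lowered copy.
import Mathlib
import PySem

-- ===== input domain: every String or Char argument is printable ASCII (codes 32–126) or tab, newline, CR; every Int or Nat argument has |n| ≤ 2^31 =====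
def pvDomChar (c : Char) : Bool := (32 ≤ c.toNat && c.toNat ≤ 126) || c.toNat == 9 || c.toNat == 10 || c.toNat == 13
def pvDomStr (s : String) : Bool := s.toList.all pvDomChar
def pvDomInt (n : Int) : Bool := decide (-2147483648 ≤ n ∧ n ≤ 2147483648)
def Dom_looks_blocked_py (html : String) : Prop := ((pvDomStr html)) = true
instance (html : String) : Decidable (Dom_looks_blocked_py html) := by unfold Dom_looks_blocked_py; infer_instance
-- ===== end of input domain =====

-- B replaces A's seven independent substring scans over a lowered copy with a
-- trie of the indicators scanned in ONE pass via an NFA-style active-state set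
-- (objective: alternative algorithm; equivalence is exact on all inputs).

set_option maxRecDepth 100000


-- ===== PORT A =====
def looks_blocked_py (html : String) : Bool :=
  if html == "" then true
  else
    let text := PySem.Str.lower html
    let indicators : List String :=
      ["access denied", "verify you are human", "captcha", "datadome",
       "incident id", "blocked", "challenge"]
    indicators.any (fun indicator => PySem.Str.isIn indicator text)

-- ===== PORT B =====
def lbIndicators : List String :=
  ["access denied", "verify you are human", "captcha", "datadome",
   "incident id", "blocked", "challenge"]

-- _build_trie's inner loop body: follow/create the child of `node` labelled `ch`
def lbBuildInner (st : List (PySem.Dict Char Nat) × List Bool × Nat) (ch : Char) :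
    List (PySem.Dict Char Nat) × List Bool × Nat :=
  match (st.1.getD st.2.2 PySem.Dict.empty).get? ch with
  | some nxt => (st.1, st.2.1, nxt)
  | none =>
      let nxt := st.1.length
      let children := st.1 ++ [PySem.Dict.empty]
      (children.set st.2.2 ((children.getD st.2.2 PySem.Dict.empty).insert ch nxt),
       st.2.1 ++ [false], nxt)

-- _build_trie's outer loop body: insert one word, mark its last node terminal
def lbBuildWord (st : List (PySem.Dict Char Nat) × List Bool) (w : String) :
    List (PySem.Dict Char Nat) × List Bool :=
  let r := w.toList.foldl lbBuildInner (st.1, st.2, 0)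
  (r.1, r.2.1.set r.2.2 true)

-- _CHILDREN, _TERMINAL = _build_trie(_INDICATORS)
def lbTrie : List (PySem.Dict Char Nat) × List Bool :=
  lbIndicators.foldl lbBuildWord ([PySem.Dict.empty], [false])

def lbChildren : List (PySem.Dict Char Nat) := lbTrie.1
def lbTerminal : List Bool := lbTrie.2

-- inner 'for node in active' loop body
def lbStepAdd (c : Char) (acc : PySem.Set Nat) (node : Nat) : PySem.Set Nat :=
  match (lbChildren.getD node PySem.Dict.empty).get? c with
  | some t => PySem.Set.add acc t
  | none => acc

-- one character of the scan: advance the active set, update the found flag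
def lbStep (st : PySem.Set Nat × Bool) (ch : Char) : PySem.Set Nat × Bool :=
  let nxt := st.1.foldl (lbStepAdd (PySem.Chars.lowerChar ch)) (PySem.Set.ofList [0])
  (nxt, st.2 || nxt.any (fun n => lbTerminal.getD n false))

def looks_blocked_py_alt (html : String) : Bool :=
  if html == "" then true
  else (html.toList.foldl lbStep (PySem.Set.ofList [0], false)).2

-- ===== PRECONDITION & SPEC =====
def Spec_looks_blocked_py (html : String) (out : Bool) : Prop := out = looks_blocked_py_alt html
instance (html : String) (out : Bool) : Decidable (Spec_looks_blocked_py html out) := by unfold Spec_looks_blocked_py; infer_instance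

-- ===== CLAIM (what is proved, stated in full; the proofs are below) =====
def Claim_equal_looks_blocked_py : Prop := ∀ (html : String), Dom_looks_blocked_py html → Spec_looks_blocked_py html (looks_blocked_py html)

-- ===== LEMMAS AND PROOFS =====

-- deterministic walk of the trie from node n along w (proof-side spec of the trie)
def lbFollow : List Char → Nat → Option Nat
  | [], n => some n
  | c :: w, n =>
    match (lbChildren.getD n PySem.Dict.empty).get? c with
    | none => none
    | some m => lbFollow w m

-- the string spelling each trie node (concrete table for the concrete trie)
def lbPaths : List (List Char) := [
  [],
  ['a'],
  ['a', 'c'],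
  ['a', 'c', 'c'],
  ['a', 'c', 'c', 'e'],
  ['a', 'c', 'c', 'e', 's'],
  ['a', 'c', 'c', 'e', 's', 's'],
  ['a', 'c', 'c', 'e', 's', 's', ' '],
  ['a', 'c', 'c', 'e', 's', 's', ' ', 'd'],
  ['a', 'c', 'c', 'e', 's', 's', ' ', 'd', 'e'],
  ['a', 'c', 'c', 'e', 's', 's', ' ', 'd', 'e', 'n'],
  ['a', 'c', 'c', 'e', 's', 's', ' ', 'd', 'e', 'n', 'i'],
  ['a', 'c', 'c', 'e', 's', 's', ' ', 'd', 'e', 'n', 'i', 'e'],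
  ['a', 'c', 'c', 'e', 's', 's', ' ', 'd', 'e', 'n', 'i', 'e', 'd'],
  ['v'],
  ['v', 'e'],
  ['v', 'e', 'r'],
  ['v', 'e', 'r', 'i'],
  ['v', 'e', 'r', 'i', 'f'],
  ['v', 'e', 'r', 'i', 'f', 'y'],
  ['v', 'e', 'r', 'i', 'f', 'y', ' '],
  ['v', 'e', 'r', 'i', 'f', 'y', ' ', 'y'],
  ['v', 'e', 'r', 'i', 'f', 'y', ' ', 'y', 'o'],
  ['v', 'e', 'r', 'i', 'f', 'y', ' ', 'y', 'o', 'u'],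
  ['v', 'e', 'r', 'i', 'f', 'y', ' ', 'y', 'o', 'u', ' '],
  ['v', 'e', 'r', 'i', 'f', 'y', ' ', 'y', 'o', 'u', ' ', 'a'],
  ['v', 'e', 'r', 'i', 'f', 'y', ' ', 'y', 'o', 'u', ' ', 'a', 'r'],
  ['v', 'e', 'r', 'i', 'f', 'y', ' ', 'y', 'o', 'u', ' ', 'a', 'r', 'e'],
  ['v', 'e', 'r', 'i', 'f', 'y', ' ', 'y', 'o', 'u', ' ', 'a', 'r', 'e', ' '],
  ['v', 'e', 'r', 'i', 'f', 'y', ' ', 'y', 'o', 'u', ' ', 'a', 'r', 'e', ' ', 'h'],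
  ['v', 'e', 'r', 'i', 'f', 'y', ' ', 'y', 'o', 'u', ' ', 'a', 'r', 'e', ' ', 'h', 'u'],
  ['v', 'e', 'r', 'i', 'f', 'y', ' ', 'y', 'o', 'u', ' ', 'a', 'r', 'e', ' ', 'h', 'u', 'm'],
  ['v', 'e', 'r', 'i', 'f', 'y', ' ', 'y', 'o', 'u', ' ', 'a', 'r', 'e', ' ', 'h', 'u', 'm', 'a'],
  ['v', 'e', 'r', 'i', 'f', 'y', ' ', 'y', 'o', 'u', ' ', 'a', 'r', 'e', ' ', 'h', 'u', 'm', 'a', 'n'],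
  ['c'],
  ['c', 'a'],
  ['c', 'a', 'p'],
  ['c', 'a', 'p', 't'],
  ['c', 'a', 'p', 't', 'c'],
  ['c', 'a', 'p', 't', 'c', 'h'],
  ['c', 'a', 'p', 't', 'c', 'h', 'a'],
  ['d'],
  ['d', 'a'],
  ['d', 'a', 't'],
  ['d', 'a', 't', 'a'],
  ['d', 'a', 't', 'a', 'd'],
  ['d', 'a', 't', 'a', 'd', 'o'],
  ['d', 'a', 't', 'a', 'd', 'o', 'm'],
  ['d', 'a', 't', 'a', 'd', 'o', 'm', 'e'],
  ['i'],
  ['i', 'n'],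
  ['i', 'n', 'c'],
  ['i', 'n', 'c', 'i'],
  ['i', 'n', 'c', 'i', 'd'],
  ['i', 'n', 'c', 'i', 'd', 'e'],
  ['i', 'n', 'c', 'i', 'd', 'e', 'n'],
  ['i', 'n', 'c', 'i', 'd', 'e', 'n', 't'],
  ['i', 'n', 'c', 'i', 'd', 'e', 'n', 't', ' '],
  ['i', 'n', 'c', 'i', 'd', 'e', 'n', 't', ' ', 'i'],
  ['i', 'n', 'c', 'i', 'd', 'e', 'n', 't', ' ', 'i', 'd'],
  ['b'],
  ['b', 'l'],
  ['b', 'l', 'o'],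
  ['b', 'l', 'o', 'c'],
  ['b', 'l', 'o', 'c', 'k'],
  ['b', 'l', 'o', 'c', 'k', 'e'],
  ['b', 'l', 'o', 'c', 'k', 'e', 'd'],
  ['c', 'h'],
  ['c', 'h', 'a'],
  ['c', 'h', 'a', 'l'],
  ['c', 'h', 'a', 'l', 'l'],
  ['c', 'h', 'a', 'l', 'l', 'e'],
  ['c', 'h', 'a', 'l', 'l', 'e', 'n'],
  ['c', 'h', 'a', 'l', 'l', 'e', 'n', 'g'],
  ['c', 'h', 'a', 'l', 'l', 'e', 'n', 'g', 'e']
]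

def lbPathL (m : Nat) : List Char := lbPaths.getD m []

def lbN : Nat := lbChildren.length

def lbIndLists : List (List Char) := lbIndicators.map String.toList

-- concrete facts about the built trie, checked by the kernel
theorem lbBasics : lbPathL 0 = [] ∧ 0 < lbN ∧ ([] : List Char) ∉ lbIndLists := by decide

theorem lbEdges : ((List.range lbN).all (fun n =>
    ((lbChildren.getD n PySem.Dict.empty).items).all (fun p =>
      decide (p.2 < lbN) && decide (lbPathL p.2 = lbPathL n ++ [p.1])))) = true := by decide

theorem lbTermAll : ((List.range lbN).all (fun m =>
    lbTerminal.getD m false == decide (lbPathL m ∈ lbIndLists))) = true := by decide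

theorem lbTermFollowAll : ((List.range lbN).all (fun m =>
    !(lbTerminal.getD m false) || (lbFollow (lbPathL m) 0 == some m))) = true := by decide

theorem lbComplete : (lbIndicators.all (fun w =>
    match lbFollow w.toList 0 with
    | some m => lbTerminal.getD m false
    | none => false)) = true := by decide

theorem lbEdge {n m : Nat} {c : Char} (hn : n < lbN)
    (h : (lbChildren.getD n PySem.Dict.empty).get? c = some m) :
    m < lbN ∧ lbPathL m = lbPathL n ++ [c] := by
  have hmem := PySem.Dict.mem_items_of_get?_eq_some _ h
  have hall := lbEdges
  rw [List.all_eq_true] at hall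
  have h1 := hall n (List.mem_range.mpr hn)
  rw [List.all_eq_true] at h1
  have h2 := h1 (c, m) hmem
  simpa using h2

theorem lbTerm {m : Nat} (hm : m < lbN) :
    lbTerminal.getD m false = true ↔ lbPathL m ∈ lbIndLists := by
  have hall := lbTermAll
  rw [List.all_eq_true] at hall
  have h1 := hall m (List.mem_range.mpr hm)
  rw [beq_iff_eq] at h1
  rw [h1]
  simp

theorem lbTermFollow {m : Nat} (hm : m < lbN) (ht : lbTerminal.getD m false = true) :
    lbFollow (lbPathL m) 0 = some m := by
  have hall := lbTermFollowAll
  rw [List.all_eq_true] at hall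
  have h1 := hall m (List.mem_range.mpr hm)
  rw [ht] at h1
  simpa using h1

theorem lbFollowPath : ∀ (w : List Char) (n m : Nat), n < lbN →
    lbFollow w n = some m → m < lbN ∧ lbPathL m = lbPathL n ++ w := by
  intro w
  induction w with
  | nil =>
      intro n m hn h
      simp only [lbFollow, Option.some.injEq] at h
      subst h
      simp [hn]
  | cons c w ih =>
      intro n m hn h
      simp only [lbFollow] at h
      cases hg : (lbChildren.getD n PySem.Dict.empty).get? c with
      | none => rw [hg] at h; simp at h
      | some t =>
          rw [hg] at h
          obtain ⟨ht, hp⟩ := lbEdge hn hg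
          obtain ⟨hm, hpm⟩ := ih t m ht h
          refine ⟨hm, ?_⟩
          rw [hpm, hp, List.append_assoc]
          rfl

theorem lbFollow_append : ∀ (u v : List Char) (n : Nat),
    lbFollow (u ++ v) n = (lbFollow u n).bind (lbFollow v) := by
  intro u
  induction u with
  | nil => intro v n; simp [lbFollow]
  | cons c u ih =>
      intro v n
      simp only [List.cons_append, lbFollow]
      cases hg : (lbChildren.getD n PySem.Dict.empty).get? c with
      | none => simp
      | some t => simp [ih]

-- membership in the advanced active set
theorem lbMemNxt (c : Char) : ∀ (l acc : List Nat) (m : Nat),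
    m ∈ l.foldl (lbStepAdd c) acc ↔
      m ∈ acc ∨ ∃ n ∈ l, (lbChildren.getD n PySem.Dict.empty).get? c = some m := by
  intro l
  induction l with
  | nil => intro acc m; simp
  | cons n l ih =>
      intro acc m
      simp only [List.foldl_cons, ih, List.mem_cons]
      unfold lbStepAdd
      cases hg : (lbChildren.getD n PySem.Dict.empty).get? c with
      | none =>
          constructor
          · rintro (h | ⟨n', hn', hm⟩)
            · exact Or.inl h
            · exact Or.inr ⟨n', Or.inr hn', hm⟩
          · rintro (h | ⟨n', (rfl | hn'), hm⟩)
            · exact Or.inl h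
            · rw [hg] at hm; cases hm
            · exact Or.inr ⟨n', hn', hm⟩
      | some t =>
          rw [PySem.Set.mem_add]
          constructor
          · rintro ((h | rfl) | ⟨n', hn', hm⟩)
            · exact Or.inl h
            · exact Or.inr ⟨n, Or.inl rfl, hg⟩
            · exact Or.inr ⟨n', Or.inr hn', hm⟩
          · rintro (h | ⟨n', (rfl | hn'), hm⟩)
            · exact Or.inl (Or.inl h)
            · rw [hg] at hm; cases hm; exact Or.inl (Or.inr rfl)
            · exact Or.inr ⟨n', hn', hm⟩

-- list decompositions used by the invariant
theorem lbSuffixConcat {w l : List Char} {c : Char} :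
    w <:+ l ++ [c] ↔ w = [] ∨ ∃ u, w = u ++ [c] ∧ u <:+ l := by
  constructor
  · rintro ⟨s, hs⟩
    rcases List.eq_nil_or_concat' w with rfl | ⟨u, c', rfl⟩
    · exact Or.inl rfl
    · have h2 : (s ++ u) ++ [c'] = l ++ [c] := by simpa using hs
      have h3 : s ++ u = l ∧ [c'] = [c] := List.append_inj' h2 rfl
      have hc : c' = c := by simpa using h3.2
      exact Or.inr ⟨u, by rw [hc], ⟨s, h3.1⟩⟩
  · rintro (rfl | ⟨u, rfl, s, rfl⟩)
    · exact List.nil_suffix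
    · exact ⟨s, by simp⟩

theorem lbInfixConcat {w l : List Char} {c : Char} :
    w <:+: l ++ [c] ↔ w <:+: l ∨ w <:+ l ++ [c] := by
  constructor
  · rintro ⟨s, t, hst⟩
    rcases List.eq_nil_or_concat' t with rfl | ⟨t', c', rfl⟩
    · exact Or.inr ⟨s, by simpa using hst⟩
    · left
      have h2 : (s ++ w ++ t') ++ [c'] = l ++ [c] := by simpa using hst
      have h3 := List.append_inj' h2 rfl
      exact ⟨s, t', h3.1⟩
  · rintro (⟨s, t, rfl⟩ | ⟨s, hs⟩)
    · exact ⟨s, t ++ [c], by simp⟩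
    · exact ⟨s, [], by simp [hs]⟩

def lbScanState (cs : List Char) : PySem.Set Nat × Bool :=
  cs.foldl lbStep (PySem.Set.ofList [0], false)

-- advancing the active set by one (lowered) character
theorem lbActiveChar (l : List Char) (c : Char)
    (ih : ∀ n, n ∈ (lbScanState l).1 ↔
      (n < lbN ∧ lbFollow (lbPathL n) 0 = some n ∧
        lbPathL n <:+ l.map PySem.Chars.lowerChar)) :
    ∀ m, m ∈ ((lbScanState l).1.foldl (lbStepAdd (PySem.Chars.lowerChar c))
        (PySem.Set.ofList [0])) ↔
      (m < lbN ∧ lbFollow (lbPathL m) 0 = some m ∧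
        lbPathL m <:+ l.map PySem.Chars.lowerChar ++ [PySem.Chars.lowerChar c]) := by
  intro m
  rw [lbMemNxt]
  constructor
  · rintro (h0 | ⟨n, hn, hg⟩)
    · have hm0 : m = 0 := by simpa [PySem.Set.mem_ofList] using h0
      subst hm0
      refine ⟨lbBasics.2.1, ?_, ?_⟩
      · rw [lbBasics.1]; rfl
      · rw [lbBasics.1]; exact List.nil_suffix
    · obtain ⟨hnN, hnf, hns⟩ := (ih n).mp hn
      obtain ⟨hmN, hpm⟩ := lbEdge hnN hg
      refine ⟨hmN, ?_, ?_⟩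
      · rw [hpm, lbFollow_append, hnf, Option.bind_some]
        simp only [lbFollow, hg]
      · obtain ⟨s, hs⟩ := hns
        exact ⟨s, by rw [hpm, ← List.append_assoc, hs]⟩
  · rintro ⟨hmN, hmf, hms⟩
    rcases lbSuffixConcat.mp hms with hnil | ⟨u, hu, hus⟩
    · left
      rw [hnil] at hmf
      have hm0 : m = 0 := by simpa [lbFollow] using hmf.symm
      simp [PySem.Set.mem_ofList, hm0]
    · right
      rw [hu, lbFollow_append] at hmf
      cases hfu : lbFollow u 0 with
      | none => rw [hfu] at hmf; simp at hmf
      | some n =>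
          rw [hfu] at hmf
          simp only [Option.bind_some, lbFollow] at hmf
          cases hg2 : (lbChildren.getD n PySem.Dict.empty).get? (PySem.Chars.lowerChar c) with
          | none => rw [hg2] at hmf; simp at hmf
          | some t =>
              rw [hg2] at hmf
              have htm : t = m := by simpa [lbFollow] using hmf
              subst htm
              obtain ⟨hnN, hpn⟩ := lbFollowPath u 0 n lbBasics.2.1 hfu
              rw [lbBasics.1] at hpn
              simp only [List.nil_append] at hpn
              refine ⟨n, (ih n).mpr ⟨hnN, ?_, ?_⟩, hg2⟩
              · rw [hpn]; exact hfu
              · rw [hpn]; exact hus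

-- the main invariant of B's scan
theorem lbInv : ∀ (cs : List Char),
    (∀ m, m ∈ (lbScanState cs).1 ↔
      (m < lbN ∧ lbFollow (lbPathL m) 0 = some m ∧
        lbPathL m <:+ cs.map PySem.Chars.lowerChar)) ∧
    ((lbScanState cs).2 = true ↔ ∃ m, m < lbN ∧ lbTerminal.getD m false = true ∧
        lbPathL m <:+: cs.map PySem.Chars.lowerChar) := by
  intro cs
  induction cs using List.reverseRecOn with
  | nil =>
      constructor
      · intro m
        constructor
        · intro hm
          have hm0 : m = 0 := by simpa [lbScanState, PySem.Set.mem_ofList] using hm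
          subst hm0
          exact ⟨lbBasics.2.1, by rw [lbBasics.1]; rfl, by rw [lbBasics.1]; simp⟩
        · rintro ⟨hmN, hmf, hms⟩
          have hnil : lbPathL m = [] := by simpa using hms
          rw [hnil] at hmf
          have hm0 : m = 0 := by simpa [lbFollow] using hmf.symm
          simp [lbScanState, PySem.Set.mem_ofList, hm0]
      · constructor
        · intro h; simp [lbScanState] at h
        · rintro ⟨m, hmN, ht, hinf⟩
          have hnil : lbPathL m = [] := by simpa using hinf
          have hp := (lbTerm hmN).mp ht
          rw [hnil] at hp
          exact absurd hp lbBasics.2.2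
  | append_singleton l c ih =>
      obtain ⟨ihA, ihF⟩ := ih
      have hstate : lbScanState (l ++ [c]) = lbStep (lbScanState l) c := by
        simp [lbScanState]
      have hmap : (l ++ [c]).map PySem.Chars.lowerChar
          = l.map PySem.Chars.lowerChar ++ [PySem.Chars.lowerChar c] := by simp
      have hA := lbActiveChar l c ihA
      have hAct : ∀ m, m ∈ (lbScanState (l ++ [c])).1 ↔
          (m < lbN ∧ lbFollow (lbPathL m) 0 = some m ∧
            lbPathL m <:+ (l ++ [c]).map PySem.Chars.lowerChar) := by
        intro m
        rw [hstate, hmap]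
        exact hA m
      refine ⟨hAct, ?_⟩
      have hsnd : (lbScanState (l ++ [c])).2 = ((lbScanState l).2 ||
          ((lbScanState l).1.foldl (lbStepAdd (PySem.Chars.lowerChar c))
            (PySem.Set.ofList [0])).any (fun n => lbTerminal.getD n false)) := by
        rw [hstate]; rfl
      rw [hsnd, Bool.or_eq_true, List.any_eq_true, hmap]
      constructor
      · rintro (h | ⟨m, hm, ht⟩)
        · obtain ⟨m, hmN, htm, hinf⟩ := ihF.mp h
          exact ⟨m, hmN, htm, lbInfixConcat.mpr (Or.inl hinf)⟩
        · obtain ⟨hmN, hmf, hms⟩ := (hA m).mp hm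
          exact ⟨m, hmN, ht, lbInfixConcat.mpr (Or.inr hms)⟩
      · rintro ⟨m, hmN, ht, hinf⟩
        rcases lbInfixConcat.mp hinf with h | h
        · exact Or.inl (ihF.mpr ⟨m, hmN, ht, h⟩)
        · exact Or.inr ⟨m, (hA m).mpr ⟨hmN, lbTermFollow hmN ht, h⟩, ht⟩

-- B's scan finds exactly the indicators occurring in the lowered text
theorem lbFound_iff (cs : List Char) :
    (lbScanState cs).2 = true ↔
      ∃ ind ∈ lbIndicators, ind.toList <:+: cs.map PySem.Chars.lowerChar := by
  rw [(lbInv cs).2]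
  constructor
  · rintro ⟨m, hmN, ht, hinf⟩
    have hp := (lbTerm hmN).mp ht
    simp only [lbIndLists, List.mem_map] at hp
    obtain ⟨ind, hind, hpe⟩ := hp
    exact ⟨ind, hind, by rw [hpe]; exact hinf⟩
  · rintro ⟨ind, hind, hinf⟩
    have hc := lbComplete
    rw [List.all_eq_true] at hc
    have h1 := hc ind hind
    cases hf : lbFollow ind.toList 0 with
    | none => rw [hf] at h1; simp at h1
    | some m =>
        rw [hf] at h1
        have ht : lbTerminal.getD m false = true := by simpa using h1
        obtain ⟨hmN, hpm⟩ := lbFollowPath ind.toList 0 m lbBasics.2.1 hf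
        rw [lbBasics.1] at hpm
        simp only [List.nil_append] at hpm
        exact ⟨m, hmN, ht, by rw [hpm]; exact hinf⟩

theorem lb_main (html : String) : looks_blocked_py html = looks_blocked_py_alt html := by
  unfold looks_blocked_py looks_blocked_py_alt
  by_cases h : html = ""
  · simp [h]
  · have h' : (html == "") = false := by simpa using h
    rw [h']
    simp only [Bool.false_eq_true, if_false]
    rw [Bool.eq_iff_iff]
    rw [show html.toList.foldl lbStep (PySem.Set.ofList [0], false) = lbScanState html.toList
      from rfl]
    rw [lbFound_iff, List.any_eq_true]
    have hlow : (PySem.Str.lower html).toList = html.toList.map PySem.Chars.lowerChar := by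
      simp [PySem.Chars.lower]
    constructor
    · rintro ⟨ind, hind, hin⟩
      rw [PySem.Str.isIn_iff_infix, hlow] at hin
      exact ⟨ind, hind, hin⟩
    · rintro ⟨ind, hind, hin⟩
      refine ⟨ind, hind, ?_⟩
      rw [PySem.Str.isIn_iff_infix, hlow]
      exact hin

-- ===== VERDICT (by name: the statement is the Claim_ definition above) =====
theorem looks_blocked_py_spec : Claim_equal_looks_blocked_py := by
  intro html _
  unfold Spec_looks_blocked_py
  exact lb_main html
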